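-- pv_equiv track=rewrite | github.com/Ruth-C552/OCR_Exploration | bmain3.py | group_text_by_rows
-- ===== SOURCE A (Python) =====
-- from typing import List, Dict, Tuple
--
-- def group_text_by_rows(ocr_results: List[Tuple], y_tolerance: int = 20) -> List[List[Tuple]]:
--     """Group text elements that are on the same horizontal line (row)."""
--     if not ocr_results:
--         return []
--
--     # Sort by y-coordinate
--     sorted_results = sorted(ocr_results, key=lambda x: x[0][0][1])
--
--     rows = []
--     current_row = [sorted_results[0]]
--     current_y = sorted_results[0][0][0][1]
--
--     for result in sorted_results[1:]:
--         y_pos = result[0][0][1]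
--
--         # If within tolerance, add to current row
--         if abs(y_pos - current_y) <= y_tolerance:
--             current_row.append(result)
--         else:
--             # Sort current row by x-coordinate (left to right)
--             current_row.sort(key=lambda x: x[0][0][0])
--             rows.append(current_row)
--             current_row = [result]
--             current_y = y_pos
--
--     # Add last row
--     if current_row:
--         current_row.sort(key=lambda x: x[0][0][0])
--         rows.append(current_row)
--
--     return rows
-- ===== SOURCE B (Python) =====
-- from typing import List, Tuple
--
-- def group_text_by_rows(ocr_results: List[Tuple], y_tolerance: int = 20) -> List[List[Tuple]]:
--     """Group text elements that are on the same horizontal line (row)."""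
--     if not ocr_results:
--         return []
--     rest = sorted(ocr_results, key=lambda t: t[0][0][1])
--     rows = []
--     while rest:
--         anchor = rest[0][0][0][1]
--         i = 1
--         while i < len(rest) and abs(rest[i][0][0][1] - anchor) <= y_tolerance:
--             i += 1
--         rows.append(sorted(rest[:i], key=lambda t: t[0][0][0]))
--         rest = rest[i:]
--     return rows
-- ===== Notes on version B (the rewrite author's own statement) =====
-- stated objective: alternative
-- what changed: A builds rows in one fold carrying a mutable current-row accumulator and anchor; B instead repeatedly slices the maximal within-tolerance prefix off the y-sorted list (an inner scan per row), sorting each slice by x as it is emitted.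
import Mathlib
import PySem

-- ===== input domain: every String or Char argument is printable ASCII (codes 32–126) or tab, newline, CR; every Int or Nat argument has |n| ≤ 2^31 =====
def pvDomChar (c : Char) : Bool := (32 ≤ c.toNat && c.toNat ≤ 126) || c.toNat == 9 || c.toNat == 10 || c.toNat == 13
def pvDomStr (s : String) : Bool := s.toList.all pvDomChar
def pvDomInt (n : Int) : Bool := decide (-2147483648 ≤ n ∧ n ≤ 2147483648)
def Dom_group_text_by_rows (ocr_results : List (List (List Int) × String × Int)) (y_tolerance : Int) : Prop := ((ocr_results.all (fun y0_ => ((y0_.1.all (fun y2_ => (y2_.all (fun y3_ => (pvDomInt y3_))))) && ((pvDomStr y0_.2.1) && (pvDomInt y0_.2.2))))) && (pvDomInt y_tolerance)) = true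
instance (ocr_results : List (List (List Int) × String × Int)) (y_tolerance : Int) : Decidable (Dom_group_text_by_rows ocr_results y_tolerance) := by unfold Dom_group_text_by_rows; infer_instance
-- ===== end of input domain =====

-- B replaces A's single fold with a mutable current-row/anchor accumulator by
-- repeatedly slicing the maximal within-tolerance prefix off the y-sorted list
-- (alternative decomposition, same cost).

-- ===== PORT A =====
-- x[0][0][1] / x[0][0][0]; the '.getD' defaults are only hit where Python raises
-- IndexError, which Pre_ excludes, so the port is exact on Pre_.
def pvKeyY (t : List (List Int) × String × Int) : Int :=
  ((PySem.List.pyGet? ((PySem.List.pyGet? t.1 0).getD []) 1).getD 0)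

def pvKeyX (t : List (List Int) × String × Int) : Int :=
  ((PySem.List.pyGet? ((PySem.List.pyGet? t.1 0).getD []) 0).getD 0)

-- current_row.sort(key=lambda x: x[0][0][0])
def pvSortX (row : List (List (List Int) × String × Int)) : List (List (List Int) × String × Int) :=
  PySem.List.sorted row pvKeyX

-- one iteration of A's for-loop over (rows, current_row, current_y)
def pvStep (y_tolerance : Int)
    (st : List (List (List (List Int) × String × Int)) × List (List (List Int) × String × Int) × Int)
    (result : List (List Int) × String × Int) :
    List (List (List (List Int) × String × Int)) × List (List (List Int) × String × Int) × Int :=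
  let y_pos := pvKeyY result
  if |y_pos - st.2.2| ≤ y_tolerance then (st.1, st.2.1 ++ [result], st.2.2)
  else (st.1 ++ [pvSortX st.2.1], [result], y_pos)

-- final 'if current_row:' + append of A
def pvFinish (st : List (List (List (List Int) × String × Int)) × List (List (List Int) × String × Int) × Int) : List (List (List (List Int) × String × Int)) :=
  if st.2.1.isEmpty then st.1 else st.1 ++ [pvSortX st.2.1]

def group_text_by_rows (ocr_results : List (List (List Int) × String × Int)) (y_tolerance : Int) : List (List (List (List Int) × String × Int)) :=
  if ocr_results.isEmpty then []
  else
    match PySem.List.sorted ocr_results pvKeyY with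
    | [] => []  -- unreachable: sorted of a nonempty list is nonempty
    | h :: t => pvFinish (t.foldl (pvStep y_tolerance) ([], [h], pvKeyY h))

-- ===== PORT B =====
-- the outer while loop of Source B: peel the maximal prefix within tolerance of the
-- row's anchor (Source B's inner index scan = takeWhile/dropWhile), sort it by x
def pvGroupGo (y_tolerance : Int) : List (List (List Int) × String × Int) → List (List (List (List Int) × String × Int))
  | [] => []
  | h :: t =>
    let anchor := pvKeyY h
    pvSortX (h :: t.takeWhile (fun r => decide (|pvKeyY r - anchor| ≤ y_tolerance))) ::
      pvGroupGo y_tolerance (t.dropWhile (fun r => decide (|pvKeyY r - anchor| ≤ y_tolerance)))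
  termination_by l => l.length
  decreasing_by simp [List.length_dropWhile_le]

def group_text_by_rows_alt (ocr_results : List (List (List Int) × String × Int)) (y_tolerance : Int) : List (List (List (List Int) × String × Int)) :=
  if ocr_results.isEmpty then []
  else pvGroupGo y_tolerance (PySem.List.sorted ocr_results pvKeyY)

-- ===== PRECONDITION & SPEC =====
-- Pre_ excludes exactly the inputs where Python A raises IndexError: an element
-- whose bbox list is empty or whose first bbox point has fewer than 2 coordinates.
def Pre_group_text_by_rows (ocr_results : List (List (List Int) × String × Int)) (y_tolerance : Int) : Prop :=
  ∀ t ∈ ocr_results, t.1 ≠ [] ∧ 2 ≤ (t.1.headD []).length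
instance (ocr_results : List (List (List Int) × String × Int)) (y_tolerance : Int) : Decidable (Pre_group_text_by_rows ocr_results y_tolerance) := by unfold Pre_group_text_by_rows; infer_instance

def pvWitness_group_text_by_rows : (List (List (List Int) × String × Int)) × Int :=
  ([([[0, 5]], "a", 1), ([[3, 40]], "b", 2)], 20)

def Spec_group_text_by_rows (ocr_results : List (List (List Int) × String × Int)) (y_tolerance : Int) (out : List (List (List (List Int) × String × Int))) : Prop := out = group_text_by_rows_alt ocr_results y_tolerance
instance (ocr_results : List (List (List Int) × String × Int)) (y_tolerance : Int) (out : List (List (List (List Int) × String × Int))) : Decidable (Spec_group_text_by_rows ocr_results y_tolerance out) := by unfold Spec_group_text_by_rows; infer_instance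

-- ===== CLAIM (what is proved, stated in full; the proofs are below) =====
def Claim_equal_group_text_by_rows : Prop := ∀ (ocr_results : List (List (List Int) × String × Int)) (y_tolerance : Int), Dom_group_text_by_rows ocr_results y_tolerance → Pre_group_text_by_rows ocr_results y_tolerance → Spec_group_text_by_rows ocr_results y_tolerance (group_text_by_rows ocr_results y_tolerance)

-- ===== LEMMAS AND PROOFS =====

-- A's loop with anchor `anchor` and nonempty current row `cur`, then finalized,
-- yields: the x-sorted extension of `cur` by the within-tolerance prefix of the
-- remaining input, followed by B's grouping of the rest.
theorem pvLoop_eq (tol : Int) (t : List (List (List Int) × String × Int)) :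
    ∀ (rows : List (List (List (List Int) × String × Int)))
      (cur : List (List (List Int) × String × Int)) (anchor : Int), cur ≠ [] →
    pvFinish (t.foldl (pvStep tol) (rows, cur, anchor)) =
    rows ++ (pvSortX (cur ++ t.takeWhile (fun r => decide (|pvKeyY r - anchor| ≤ tol))) ::
      pvGroupGo tol (t.dropWhile (fun r => decide (|pvKeyY r - anchor| ≤ tol)))) := by
  induction t with
  | nil =>
    intro rows cur anchor hcur
    simp [pvFinish, pvGroupGo, List.isEmpty_iff, hcur]
  | cons r rest ih =>
    intro rows cur anchor hcur
    simp only [List.foldl_cons, pvStep]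
    by_cases h : |pvKeyY r - anchor| ≤ tol
    · rw [if_pos h, ih rows (cur ++ [r]) anchor (by simp)]
      simp [h]
    · rw [if_neg h, ih (rows ++ [pvSortX cur]) [r] (pvKeyY r) (by simp)]
      simp [h, pvGroupGo]

-- ===== VERDICT (by name: the statement is the Claim_ definition above) =====
theorem group_text_by_rows_spec : Claim_equal_group_text_by_rows := by
  intro ocr tol _ _
  unfold Spec_group_text_by_rows group_text_by_rows group_text_by_rows_alt
  by_cases he : ocr.isEmpty
  · simp [he]
  · simp only [he, if_neg, Bool.false_eq_true, not_false_iff]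
    cases hs : PySem.List.sorted ocr pvKeyY with
    | nil =>
      have hp := PySem.List.sorted_perm (xs := ocr) (key := pvKeyY) (rev := false)
      rw [hs] at hp
      rw [List.nil_perm] at hp
      simp [hp] at he
    | cons h t =>
      show pvFinish (t.foldl (pvStep tol) ([], [h], pvKeyY h)) = pvGroupGo tol (h :: t)
      rw [pvLoop_eq tol t [] [h] (pvKeyY h) (by simp)]
      simp [pvGroupGo]
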